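-- pv_equiv track=rewrite | github.com/arikislam/syllaby-postman-collection | route_analyzer.py | categorize_routes
-- ===== SOURCE A (Python) =====
-- from typing import List, Tuple, Set
--
-- def categorize_routes(routes: Set[Tuple[str, str]]) -> dict:
--     """Categorize routes by their prefix/category"""
--     categories = {}
--
--     for method, path in routes:
--         if not path:
--             category = "root"
--         else:
--             # Get the first segment as category
--             parts = path.split('/')
--             category = parts[0] if parts[0] else "root"
--
--         if category not in categories:
--             categories[category] = []
--         categories[category].append((method, path))
--
--     # Sort each category
--     for category in categories:
--         categories[category].sort()
--
--     return categories
-- ===== SOURCE B (Python) =====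
-- def categorize_routes(routes):
--     """Categorize routes by their prefix/category.
--
--     One global sort of the routes up front, then a single appending pass:
--     each category list comes out already sorted, so no per-group sort is needed.
--     (Keys are pre-registered in input order so the dict's key order matches.)
--     """
--     def category_of(path):
--         return path.split('/')[0] or "root"
--
--     categories = {}
--     for method, path in routes:
--         categories.setdefault(category_of(path), [])
--     for route in sorted(routes):
--         categories[category_of(route[1])].append(route)
--     return categories
-- ===== Notes on version B (the rewrite author's own statement) =====
-- stated objective: alternative
-- what changed: Instead of grouping first and then sorting every category list separately, B sorts the whole route list once up front and does a single appending pass, so each category list emerges already sorted and the trailing per-group sort loop disappears (keys pre-registered in input order to keep the dict's key order).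
import Mathlib
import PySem

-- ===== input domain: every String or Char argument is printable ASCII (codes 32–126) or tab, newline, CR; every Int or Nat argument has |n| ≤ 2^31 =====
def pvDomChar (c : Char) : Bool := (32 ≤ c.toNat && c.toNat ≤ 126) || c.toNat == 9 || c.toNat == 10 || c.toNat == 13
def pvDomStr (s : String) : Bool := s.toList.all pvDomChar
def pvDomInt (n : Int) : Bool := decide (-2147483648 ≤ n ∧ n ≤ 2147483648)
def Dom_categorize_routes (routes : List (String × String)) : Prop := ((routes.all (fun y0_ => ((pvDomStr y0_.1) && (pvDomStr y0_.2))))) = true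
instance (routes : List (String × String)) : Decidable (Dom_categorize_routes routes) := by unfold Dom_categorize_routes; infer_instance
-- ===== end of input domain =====

-- B replaces A's group-then-sort-each-category with one global sort of the routes up
-- front and a single appending pass (keys pre-registered in input order), so the
-- per-category sort loop disappears; same cost class, different control flow.

-- ===== PORT A =====
-- category = "root" if not path else (parts[0] if parts[0] else "root"), parts = path.split('/')
-- (sep "/" ≠ "" so split? is always some; split yields ≥ 1 piece so index 0 is in range)
def pvCatA (path : String) : String :=
  if path = "" then "root"
  else
    let parts := (PySem.Str.split? path "/").getD []
    if PySem.List.pyGetD parts 0 "" ≠ "" then PySem.List.pyGetD parts 0 "" else "root"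

def categorize_routes (routes : List (String × String)) : List (String × List (String × String)) :=
  let categories := routes.foldl
    (fun d mp =>
      let category := pvCatA mp.2
      let d' := if d.contains category then d else d.insert category ([] : List (String × String))
      d'.modify category [] (fun l => l ++ [mp]))
    PySem.Dict.empty
  -- for category in categories: categories[category].sort()  (tuples compare lexicographically)
  categories.items.map (fun kv => (kv.1, PySem.List.sorted2 kv.2 Prod.fst Prod.snd false))

-- ===== PORT B =====
-- category_of(path) = path.split('/')[0] or "root"
def pvCatB (path : String) : String :=
  let head := PySem.List.pyGetD ((PySem.Str.split? path "/").getD []) 0 ""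
  if head = "" then "root" else head

def categorize_routes_alt (routes : List (String × String)) : List (String × List (String × String)) :=
  -- first pass: categories.setdefault(category_of(path), [])
  let d0 := routes.foldl
    (fun d mp => if d.contains (pvCatB mp.2) then d else d.insert (pvCatB mp.2) ([] : List (String × String)))
    PySem.Dict.empty
  -- second pass over sorted(routes): categories[category_of(route[1])].append(route)
  -- (the key is always present, so the lookup+append is Dict.modify with default [])
  let d1 := (PySem.List.sorted2 routes Prod.fst Prod.snd false).foldl
    (fun d mp => d.modify (pvCatB mp.2) [] (fun l => l ++ [mp])) d0
  d1.items

-- ===== PRECONDITION & SPEC =====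
def Spec_categorize_routes (routes : List (String × String)) (out : List (String × List (String × String))) : Prop := out = categorize_routes_alt routes
instance (routes : List (String × String)) (out : List (String × List (String × String))) : Decidable (Spec_categorize_routes routes out) := by unfold Spec_categorize_routes; infer_instance

-- ===== CLAIM (what is proved, stated in full; the proofs are below) =====
def Claim_equal_categorize_routes : Prop := ∀ (routes : List (String × String)), Dom_categorize_routes routes → Spec_categorize_routes routes (categorize_routes routes)

-- ===== LEMMAS AND PROOFS =====

-- the two ports compute the same category string
theorem pvCat_eq : pvCatA = pvCatB := by
  funext path
  by_cases h : path = ""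
  · subst h; decide
  · simp only [pvCatA, pvCatB, h]
    by_cases h0 : PySem.List.pyGetD ((PySem.Str.split? path "/").getD []) 0 "" = "" <;> simp [h0]

-- the comparison Python's sorted/list.sort uses on (method, path) pairs
def pvMyLt (a b : String × String) : Bool :=
  decide (a.1 < b.1) || (!decide (b.1 < a.1) && decide (a.2 < b.2))

theorem pvMyLt_irrefl (a : String × String) : pvMyLt a a = false := by
  simp [pvMyLt]

theorem pvMyLt_trans (a b c : String × String) (h1 : pvMyLt a b = true) (h2 : pvMyLt b c = true) :
    pvMyLt a c = true := by
  simp only [pvMyLt, Bool.or_eq_true, Bool.and_eq_true, Bool.not_eq_eq_eq_not, Bool.not_true,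
    decide_eq_true_eq, decide_eq_false_iff_not] at h1 h2 ⊢
  rcases h1 with h1 | ⟨h1a, h1b⟩ <;> rcases h2 with h2 | ⟨h2a, h2b⟩
  · exact Or.inl (lt_trans h1 h2)
  · exact Or.inl (lt_of_lt_of_le h1 (not_lt.mp h2a))
  · exact Or.inl (lt_of_le_of_lt (not_lt.mp h1a) h2)
  · exact Or.inr ⟨by rw [not_lt] at h1a h2a ⊢; exact le_trans h1a h2a, lt_trans h1b h2b⟩

theorem pvMyLt_total (a b : String × String) (h1 : pvMyLt a b = false) (h2 : pvMyLt b a = false) :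
    a = b := by
  simp only [pvMyLt, Bool.or_eq_false_iff, Bool.and_eq_false_iff, Bool.not_eq_eq_eq_not,
    Bool.not_false, decide_eq_false_iff_not, decide_eq_true_eq] at h1 h2
  obtain ⟨h1a, h1b⟩ := h1
  obtain ⟨h2a, h2b⟩ := h2
  have hf : a.1 = b.1 := le_antisymm (not_lt.mp h2a) (not_lt.mp h1a)
  have hs : a.2 = b.2 := by
    rcases h1b with h | h
    · exact absurd h h2a
    · rcases h2b with h' | h'
      · exact absurd h' h1a
      · exact le_antisymm (not_lt.mp h') (not_lt.mp h)
  exact Prod.ext hf hs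

theorem pv_insertBy_head {α : Type} (lt : α → α → Bool) (x : α) (zs : List α)
    (h : ∀ z ∈ zs, lt x z = true) : PySem.List.insertBy lt x zs = x :: zs := by
  cases zs with
  | nil => rfl
  | cons z zs => simp [PySem.List.insertBy, h z (by simp)]

theorem pv_insertBy_pairwise {α : Type} (lt : α → α → Bool)
    (htrans : ∀ a b c, lt a b = true → lt b c = true → lt a c = true)
    (hirr : ∀ a, lt a a = false)
    (x : α) (ys : List α) (h : ys.Pairwise (fun a b => lt b a = false)) :
    (PySem.List.insertBy lt x ys).Pairwise (fun a b => lt b a = false) := by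
  induction ys with
  | nil => simp [PySem.List.insertBy]
  | cons y ys ih =>
    rcases List.pairwise_cons.mp h with ⟨hy, hys⟩
    by_cases hlt : lt x y = true
    · rw [show PySem.List.insertBy lt x (y :: ys) = x :: y :: ys by simp [PySem.List.insertBy, hlt]]
      refine List.pairwise_cons.mpr ⟨?_, h⟩
      intro z hz
      rcases List.mem_cons.mp hz with rfl | hz'
      · by_contra hyx
        have hyx' : lt z x = true := by simpa using hyx
        have := htrans _ _ _ hyx' hlt
        rw [hirr] at this
        exact Bool.false_ne_true this
      · by_contra hzx
        have hzx' : lt z x = true := by simpa using hzx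
        have := htrans _ _ _ hzx' hlt
        rw [hy z hz'] at this
        exact Bool.false_ne_true this
    · have hlt' : lt x y = false := by simpa using hlt
      rw [show PySem.List.insertBy lt x (y :: ys) = y :: PySem.List.insertBy lt x ys by
        simp [PySem.List.insertBy, hlt']]
      refine List.pairwise_cons.mpr ⟨?_, ih hys⟩
      intro w hw
      rcases (PySem.List.mem_insertBy lt x w ys).mp hw with rfl | hw'
      · exact hlt'
      · exact hy w hw'

theorem pv_insertBy_filter {α : Type} (lt : α → α → Bool)
    (htrans : ∀ a b c, lt a b = true → lt b c = true → lt a c = true)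
    (htot : ∀ a b, lt a b = false → lt b a = false → a = b)
    (p : α → Bool) (x : α) (ys : List α) (h : ys.Pairwise (fun a b => lt b a = false)) :
    (PySem.List.insertBy lt x ys).filter p =
      if p x then PySem.List.insertBy lt x (ys.filter p) else ys.filter p := by
  induction ys with
  | nil => by_cases hx : p x <;> simp [PySem.List.insertBy, hx]
  | cons y ys ih =>
    rcases List.pairwise_cons.mp h with ⟨hy, hys⟩
    by_cases hlt : lt x y = true
    · rw [show PySem.List.insertBy lt x (y :: ys) = x :: y :: ys by simp [PySem.List.insertBy, hlt]]
      by_cases hx : p x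
      · -- x stays; x is strictly before everything kept of y :: ys
        have hall : ∀ z ∈ (y :: ys).filter p, lt x z = true := by
          intro z hz
          have hz' : z ∈ y :: ys := List.mem_of_mem_filter hz
          rcases List.mem_cons.mp hz' with rfl | hz''
          · exact hlt
          · by_cases hxz : lt x z = true
            · exact hxz
            · by_cases hzx : lt z x = true
              · exfalso
                have := htrans _ _ _ hzx hlt
                rw [hy z hz''] at this
                exact Bool.false_ne_true this
              · have : x = z := htot x z (by simpa using hxz) (by simpa using hzx)
                subst this
                rw [hy x hz''] at hlt
                exact absurd hlt Bool.false_ne_true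
        rw [pv_insertBy_head lt x _ hall]
        simp [hx]
      · simp [List.filter_cons, hx]
    · have hlt' : lt x y = false := by simpa using hlt
      rw [show PySem.List.insertBy lt x (y :: ys) = y :: PySem.List.insertBy lt x ys by
        simp [PySem.List.insertBy, hlt']]
      by_cases hpy : p y
      · rw [List.filter_cons_of_pos hpy, List.filter_cons_of_pos hpy, ih hys]
        by_cases hx : p x
        · rw [if_pos hx, if_pos hx,
            show PySem.List.insertBy lt x (y :: ys.filter p) = y :: PySem.List.insertBy lt x (ys.filter p) by
              simp [PySem.List.insertBy, hlt']]
        · simp [hx]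
      · rw [List.filter_cons_of_neg hpy, List.filter_cons_of_neg hpy, ih hys]

theorem pv_foldl_insertBy_filter {α : Type} (lt : α → α → Bool)
    (htrans : ∀ a b c, lt a b = true → lt b c = true → lt a c = true)
    (hirr : ∀ a, lt a a = false)
    (htot : ∀ a b, lt a b = false → lt b a = false → a = b)
    (p : α → Bool) (xs acc : List α) (hacc : acc.Pairwise (fun a b => lt b a = false)) :
    (xs.foldl (fun a x => PySem.List.insertBy lt x a) acc).filter p =
      (xs.filter p).foldl (fun a x => PySem.List.insertBy lt x a) (acc.filter p) := by
  induction xs generalizing acc with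
  | nil => rfl
  | cons x xs ih =>
    rw [List.foldl_cons, ih _ (pv_insertBy_pairwise lt htrans hirr x acc hacc),
      pv_insertBy_filter lt htrans htot p x acc hacc]
    by_cases hx : p x
    · rw [if_pos hx, List.filter_cons_of_pos hx, List.foldl_cons]
    · rw [if_neg hx, List.filter_cons_of_neg hx]

theorem pv_sorted2_eq_foldl (xs : List (String × String)) :
    PySem.List.sorted2 xs Prod.fst Prod.snd false =
      xs.foldl (fun acc x => PySem.List.insertBy pvMyLt x acc) [] := rfl

-- filtering commutes with Python's (stable) sort of pairs
theorem pv_sorted2_filter (p : String × String → Bool) (routes : List (String × String)) :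
    (PySem.List.sorted2 routes Prod.fst Prod.snd false).filter p =
      PySem.List.sorted2 (routes.filter p) Prod.fst Prod.snd false := by
  rw [pv_sorted2_eq_foldl, pv_sorted2_eq_foldl,
    pv_foldl_insertBy_filter pvMyLt pvMyLt_trans pvMyLt_irrefl pvMyLt_total p routes []
      (List.Pairwise.nil)]
  rfl

-- dicts whose items are "key ↦ f key" over a key list
theorem pvDict_get?_map (L : List String) (f : String → List (String × String)) (c : String) :
    (PySem.Dict.mk (L.map (fun k => (k, f k)))).get? c = if c ∈ L then some (f c) else none := by
  induction L with
  | nil => simp [PySem.Dict.get?]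
  | cons k L ih =>
    by_cases hk : k = c
    · subst hk; simp [PySem.Dict.get?]
    · simp only [PySem.Dict.get?, List.map_cons, List.find?] at ih ⊢
      rw [show ((k, f k).1 == c) = false by simpa using hk]
      simp only [ih, List.mem_cons]
      by_cases hc : c ∈ L <;> simp [hc, Ne.symm hk]

theorem pvDict_contains_map (L : List String) (f : String → List (String × String)) (c : String) :
    (PySem.Dict.mk (L.map (fun k => (k, f k)))).contains c = decide (c ∈ L) := by
  by_cases h : c ∈ L
  · simp only [h, decide_true]
    simp only [PySem.Dict.contains, List.any_map, List.any_eq_true, Function.comp_def]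
    exact ⟨c, h, by simp⟩
  · simp only [h, decide_false]
    simp only [PySem.Dict.contains, List.any_map, List.any_eq_false, Function.comp_def]
    intro k hk
    simp only [beq_iff_eq]
    exact fun e => h (e ▸ hk)

theorem pvDict_modify_map (L : List String) (f : String → List (String × String)) (c : String)
    (g : List (String × String) → List (String × String)) :
    ((PySem.Dict.mk (L.map (fun k => (k, f k)))).modify c [] g).items =
      if c ∈ L then L.map (fun k => (k, if k = c then g (f c) else f k))
      else L.map (fun k => (k, f k)) ++ [(c, g [])] := by
  simp only [PySem.Dict.modify, PySem.Dict.insert, PySem.Dict.getD, pvDict_get?_map,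
    pvDict_contains_map L f c]
  by_cases h : c ∈ L
  · simp only [h, decide_true, if_true, Option.getD_some, List.map_map]
    apply List.map_congr_left
    intro k _
    by_cases hk : k = c <;> simp [hk]
  · simp [h]

theorem pvDict_insert_new_map (L : List String) (f : String → List (String × String)) (c : String)
    (h : c ∉ L) :
    ((PySem.Dict.mk (L.map (fun k => (k, f k)))).insert c ([] : List (String × String))).items =
      L.map (fun k => (k, f k)) ++ [(c, [])] := by
  simp [PySem.Dict.insert, pvDict_contains_map L f c, h]

-- key list: first-occurrence categories
def pvKeys (routes : List (String × String)) : List String :=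
  PySem.List.dedup (routes.map (fun mp => pvCatB mp.2))

theorem pv_dedup_append (xs : List String) (x : String) :
    PySem.List.dedup (xs ++ [x]) =
      if x ∈ PySem.List.dedup xs then PySem.List.dedup xs else PySem.List.dedup xs ++ [x] := by
  rw [show PySem.List.dedup (xs ++ [x]) = (xs ++ [x]).foldl PySem.Set.add [] from rfl,
    List.foldl_append, List.foldl_cons, List.foldl_nil,
    show xs.foldl PySem.Set.add [] = PySem.List.dedup xs from rfl]
  simp only [PySem.Set.add, PySem.Set.contains]
  by_cases h : x ∈ PySem.List.dedup xs <;> simp [h]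

theorem pvKeys_append (rs : List (String × String)) (mp : String × String) :
    pvKeys (rs ++ [mp]) =
      if pvCatB mp.2 ∈ pvKeys rs then pvKeys rs else pvKeys rs ++ [pvCatB mp.2] := by
  unfold pvKeys
  rw [List.map_append, List.map_singleton, pv_dedup_append]

theorem pv_filter_nil_of_not_key (rs : List (String × String)) (c : String)
    (h : c ∉ pvKeys rs) : rs.filter (fun mp => pvCatB mp.2 == c) = [] := by
  rw [List.filter_eq_nil_iff]
  intro mp hmp
  simp only [beq_iff_eq]
  intro e
  exact h (by simp only [pvKeys, PySem.List.mem_dedup, List.mem_map]; exact ⟨mp, hmp, e⟩)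

-- A's grouping fold computes "first-occurrence keys ↦ filtered routes"
theorem pv_lemA (routes : List (String × String)) :
    (routes.foldl
      (fun d mp =>
        let category := pvCatB mp.2
        let d' := if d.contains category then d else d.insert category ([] : List (String × String))
        d'.modify category [] (fun l => l ++ [mp]))
      PySem.Dict.empty).items =
    (pvKeys routes).map (fun k => (k, routes.filter (fun mp => pvCatB mp.2 == k))) := by
  induction routes using List.reverseRecOn with
  | nil => rfl
  | append_singleton rs mp ih =>
    rw [List.foldl_append, List.foldl_cons, List.foldl_nil]
    have hd : rs.foldl
        (fun d mp =>
          let category := pvCatB mp.2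
          let d' := if d.contains category then d else d.insert category ([] : List (String × String))
          d'.modify category [] (fun l => l ++ [mp]))
        PySem.Dict.empty
        = PySem.Dict.mk ((pvKeys rs).map (fun k => (k, rs.filter (fun mp => pvCatB mp.2 == k)))) :=
      PySem.Dict.ext ih
    rw [hd]
    simp only []
    set c := pvCatB mp.2 with hc
    set f : String → List (String × String) := fun k => rs.filter (fun mp => pvCatB mp.2 == k) with hf
    by_cases hmem : c ∈ pvKeys rs
    · rw [pvDict_contains_map (pvKeys rs) f c, if_pos (by simpa using hmem),
        pvDict_modify_map (pvKeys rs) f c, if_pos hmem, pvKeys_append, if_pos hmem]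
      apply List.map_congr_left
      intro k hk
      by_cases hkc : k = c
      · subst hkc
        simp [f, List.filter_append, hc]
      · simp only [if_neg hkc, Prod.mk.injEq, true_and, f]
        rw [List.filter_append]
        simp [Ne.symm hkc, ← hc]
    · rw [pvDict_contains_map (pvKeys rs) f c, if_neg (by simpa using hmem)]
      have hins : ((PySem.Dict.mk ((pvKeys rs).map (fun k => (k, f k)))).insert c
          ([] : List (String × String)))
          = PySem.Dict.mk ((pvKeys rs ++ [c]).map
              (fun k => (k, if k = c then [] else f k))) := by
        apply PySem.Dict.ext
        rw [pvDict_insert_new_map (pvKeys rs) f c hmem, List.map_append, List.map_singleton,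
          if_pos rfl]
        congr 1
        apply List.map_congr_left
        intro k hk
        rw [if_neg (show ¬ k = c from fun e => hmem (e ▸ hk))]
      rw [hins, pvDict_modify_map (pvKeys rs ++ [c]) _ c, if_pos (by simp), pvKeys_append,
        if_neg hmem]
      apply List.map_congr_left
      intro k hk
      by_cases hkc : k = c
      · subst hkc
        simp only [Prod.mk.injEq, true_and]
        rw [List.filter_append, pv_filter_nil_of_not_key rs c hmem]
        simp [hc]
      · simp only [if_neg hkc, Prod.mk.injEq, true_and, f]
        rw [List.filter_append]
        simp [Ne.symm hkc, ← hc]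

-- B's first pass registers the keys with empty lists
theorem pv_lemB0 (routes : List (String × String)) :
    (routes.foldl
      (fun d mp => if d.contains (pvCatB mp.2) then d else d.insert (pvCatB mp.2) ([] : List (String × String)))
      PySem.Dict.empty).items =
    (pvKeys routes).map (fun k => (k, ([] : List (String × String)))) := by
  induction routes using List.reverseRecOn with
  | nil => rfl
  | append_singleton rs mp ih =>
    rw [List.foldl_append, List.foldl_cons, List.foldl_nil]
    have hd : rs.foldl
        (fun d mp => if d.contains (pvCatB mp.2) then d else d.insert (pvCatB mp.2) ([] : List (String × String)))
        PySem.Dict.empty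
        = PySem.Dict.mk ((pvKeys rs).map (fun k => (k, ([] : List (String × String))))) :=
      PySem.Dict.ext ih
    rw [hd, pvDict_contains_map (pvKeys rs) _ (pvCatB mp.2), pvKeys_append]
    by_cases hmem : pvCatB mp.2 ∈ pvKeys rs
    · rw [if_pos (by simpa using hmem), if_pos hmem]
    · rw [if_neg (by simpa using hmem), if_neg hmem]
      rw [pvDict_insert_new_map (pvKeys rs) _ (pvCatB mp.2) hmem]
      simp

-- B's second pass appends each route of qs to its category's list
theorem pv_lemB1 (qs : List (String × String)) (L : List String)
    (f : String → List (String × String))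
    (h : ∀ mp ∈ qs, pvCatB mp.2 ∈ L) :
    ((qs.foldl (fun d mp => d.modify (pvCatB mp.2) [] (fun l => l ++ [mp]))
        (PySem.Dict.mk (L.map (fun k => (k, f k)))))).items =
      L.map (fun k => (k, f k ++ qs.filter (fun mp => pvCatB mp.2 == k))) := by
  induction qs generalizing f with
  | nil => simp
  | cons mp qs ih =>
    rw [List.foldl_cons]
    have hstep : (PySem.Dict.mk (L.map (fun k => (k, f k)))).modify (pvCatB mp.2) []
          (fun l => l ++ [mp])
        = PySem.Dict.mk (L.map (fun k => (k, if k = pvCatB mp.2 then f (pvCatB mp.2) ++ [mp] else f k))) := by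
      apply PySem.Dict.ext
      rw [pvDict_modify_map, if_pos (h mp (by simp))]
    rw [hstep]
    have := ih (fun k => if k = pvCatB mp.2 then f (pvCatB mp.2) ++ [mp] else f k)
      (fun mp' hmp' => h mp' (by simp [hmp']))
    rw [this]
    apply List.map_congr_left
    intro k hk
    by_cases hkc : k = pvCatB mp.2
    · subst hkc
      simp
    · simp [hkc, Ne.symm hkc]

-- ===== VERDICT (by name: the statement is the Claim_ definition above) =====
theorem categorize_routes_spec : Claim_equal_categorize_routes := by
  intro routes _
  unfold Spec_categorize_routes
  show categorize_routes routes = categorize_routes_alt routes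
  simp only [categorize_routes, categorize_routes_alt, pvCat_eq]
  rw [pv_lemA routes]
  have h0 : routes.foldl
      (fun d mp => if d.contains (pvCatB mp.2) then d else d.insert (pvCatB mp.2) ([] : List (String × String)))
      PySem.Dict.empty
      = PySem.Dict.mk ((pvKeys routes).map (fun k => (k, (fun _ : String => ([] : List (String × String))) k))) :=
    PySem.Dict.ext (pv_lemB0 routes)
  rw [h0, pv_lemB1 _ _ _ (fun mp hmp => by
    have : mp ∈ routes := (PySem.List.sorted2_perm routes Prod.fst Prod.snd false).mem_iff.mp hmp
    simp only [pvKeys, PySem.List.mem_dedup, List.mem_map]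
    exact ⟨mp, this, rfl⟩)]
  rw [List.map_map]
  apply List.map_congr_left
  intro k _
  simp only [Function.comp_def, List.nil_append, Prod.mk.injEq, true_and]
  rw [pv_sorted2_filter]
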